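-- pv_equiv track=rewrite | github.com/TRON-Bioinformatics/neofox | input/self_similarity/self_similarity.py | position_of_mutation_epitope
-- ===== SOURCE A (Python) =====
-- def position_of_mutation_epitope(wild_type, mutation):
--     '''
--     This function determines the position of the mutation within the epitope sequence.
--     '''
--     p1 = -1
--     try:
--         for i, aa in enumerate(mutation):
--             if aa != wild_type[i]:
--                 p1 = i + 1
--         return str(p1)
--     except:
--         return "NA"
-- ===== SOURCE B (Python) =====
-- def position_of_mutation_epitope(wild_type, mutation):
--     '''
--     This function determines the position of the mutation within the epitope sequence.
--     '''
--     try: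
--         for i in range(len(mutation) - 1, -1, -1):
--             if wild_type[i] != mutation[i]:
--                 return str(i + 1)
--         return "-1"
--     except:
--         return "NA"
-- ===== Notes on version B (the rewrite author's own statement) =====
-- stated objective: faster
-- what changed: B scans backward from the end and returns immediately at the first (i.e. last) differing index, instead of A's forward pass that accumulates the last differing position over the whole string.
import Mathlib
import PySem

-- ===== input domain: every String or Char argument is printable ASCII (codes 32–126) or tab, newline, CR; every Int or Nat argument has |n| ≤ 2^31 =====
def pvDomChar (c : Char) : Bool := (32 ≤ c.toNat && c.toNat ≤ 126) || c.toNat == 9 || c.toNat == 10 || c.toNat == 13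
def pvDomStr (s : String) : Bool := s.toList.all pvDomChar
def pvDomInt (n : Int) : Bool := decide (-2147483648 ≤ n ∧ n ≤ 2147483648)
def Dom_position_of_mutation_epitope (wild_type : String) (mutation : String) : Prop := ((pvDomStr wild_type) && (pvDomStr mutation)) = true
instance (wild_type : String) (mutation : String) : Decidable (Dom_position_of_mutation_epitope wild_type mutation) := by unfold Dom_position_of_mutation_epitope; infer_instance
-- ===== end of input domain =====

-- B scans from the end with an early return at the first (= last) differing index,
-- instead of A's forward pass that accumulates the last differing position (objective: alternative).

-- ===== PORT A =====
-- forward loop over enumerate(mutation); p1 keeps the last differing position;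
-- an out-of-range wild_type[i] (pyGet? = none) is the IndexError caught as "NA"
def pvALoop (wl : List Char) (ml : List Char) (i : Nat) (p1 : Int) : String :=
  match ml with
  | [] => PySem.Int.toStr p1
  | aa :: rest =>
    match PySem.List.pyGet? wl (i : Int) with
    | none => "NA"
    | some c => pvALoop wl rest (i + 1) (if aa ≠ c then (i : Int) + 1 else p1)

def position_of_mutation_epitope (wild_type : String) (mutation : String) : String :=
  pvALoop wild_type.toList mutation.toList 0 (-1)

-- ===== PORT B =====
-- backward loop: k counts the indices still to inspect (current index is k-1);
-- the first difference found from the end returns immediately; exhaustion gives "-1";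
-- an out-of-range wild_type[k-1] (pyGet? = none) is the IndexError caught as "NA"
def pvBLoop (wl : List Char) (ml : List Char) : Nat → String
  | 0 => "-1"
  | k + 1 =>
    match PySem.List.pyGet? wl (k : Int), PySem.List.pyGet? ml (k : Int) with
    | some c, some aa => if c ≠ aa then PySem.Int.toStr ((k : Int) + 1) else pvBLoop wl ml k
    | _, _ => "NA"

def position_of_mutation_epitope_alt (wild_type : String) (mutation : String) : String :=
  pvBLoop wild_type.toList mutation.toList mutation.toList.length

-- ===== PRECONDITION & SPEC =====
def Spec_position_of_mutation_epitope (wild_type : String) (mutation : String) (out : String) : Prop := out = position_of_mutation_epitope_alt wild_type mutation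
instance (wild_type : String) (mutation : String) (out : String) : Decidable (Spec_position_of_mutation_epitope wild_type mutation out) := by unfold Spec_position_of_mutation_epitope; infer_instance

-- ===== CLAIM (what is proved, stated in full; the proofs are below) =====
def Claim_equal_position_of_mutation_epitope : Prop := ∀ (wild_type : String) (mutation : String), Dom_position_of_mutation_epitope wild_type mutation → Spec_position_of_mutation_epitope wild_type mutation (position_of_mutation_epitope wild_type mutation)

-- ===== LEMMAS AND PROOFS =====

-- the pure value A's loop accumulates (indices in range)
def pvAVal (wl : List Char) (ml : List Char) (i : Nat) (p1 : Int) : Int :=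
  match ml with
  | [] => p1
  | aa :: rest => pvAVal wl rest (i + 1) (if aa ≠ wl.getD i 'a' then (i : Int) + 1 else p1)

-- the pure value B's loop computes (indices in range)
def pvBVal (wl : List Char) (ml : List Char) : Nat → Int
  | 0 => -1
  | k + 1 => if wl.getD k 'a' ≠ ml.getD k 'a' then (k : Int) + 1 else pvBVal wl ml k

theorem pvALoop_eq_toStr (wl : List Char) :
    ∀ (ml : List Char) (i : Nat) (p1 : Int), i + ml.length ≤ wl.length →
      pvALoop wl ml i p1 = PySem.Int.toStr (pvAVal wl ml i p1) := by
  intro ml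
  induction ml with
  | nil => intro i p1 _; rfl
  | cons aa rest ih =>
    intro i p1 h
    have hi : i < wl.length := by simp at h; omega
    have : PySem.List.pyGet? wl (i : Int) = some (wl.getD i 'a') := by
      rw [PySem.List.pyGet?_natCast]
      simp [List.getD, List.getElem?_eq_getElem hi]
    simp only [pvALoop, pvAVal, this]
    exact ih (i + 1) _ (by simp at h ⊢; omega)

theorem pvALoop_na (wl : List Char) :
    ∀ (ml : List Char) (i : Nat) (p1 : Int), ml ≠ [] → wl.length < i + ml.length →
      pvALoop wl ml i p1 = "NA" := by
  intro ml
  induction ml with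
  | nil => intro i p1 h; exact absurd rfl h
  | cons aa rest ih =>
    intro i p1 _ h
    by_cases hi : i < wl.length
    · have hr : rest ≠ [] := by
        intro he; subst he; simp at h; omega
      have : PySem.List.pyGet? wl (i : Int) = some (wl.getD i 'a') := by
        rw [PySem.List.pyGet?_natCast]
        simp [List.getD, List.getElem?_eq_getElem hi]
      simp only [pvALoop, this]
      exact ih (i + 1) _ hr (by simp at h ⊢; omega)
    · have : PySem.List.pyGet? wl (i : Int) = none := by
        rw [PySem.List.pyGet?_natCast]
        simp; omega
      simp [pvALoop, this]

theorem pvBLoop_eq_toStr (wl ml : List Char) :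
    ∀ (k : Nat), k ≤ wl.length → k ≤ ml.length →
      pvBLoop wl ml k = PySem.Int.toStr (pvBVal wl ml k) := by
  intro k
  induction k with
  | zero => intro _ _; simp [pvBLoop, pvBVal]; decide
  | succ k ih =>
    intro hw hm
    have hkw : k < wl.length := by omega
    have hkm : k < ml.length := by omega
    have h1 : PySem.List.pyGet? wl (k : Int) = some (wl.getD k 'a') := by
      rw [PySem.List.pyGet?_natCast]
      simp [List.getD, List.getElem?_eq_getElem hkw]
    have h2 : PySem.List.pyGet? ml (k : Int) = some (ml.getD k 'a') := by
      rw [PySem.List.pyGet?_natCast]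
      simp [List.getD, List.getElem?_eq_getElem hkm]
    simp only [pvBLoop, pvBVal, h1, h2]
    split_ifs with h
    · rfl
    · exact ih (by omega) (by omega)

-- pvBVal only looks at indices < k of ml
theorem pvBVal_append (wl : List Char) :
    ∀ (k : Nat) (ml rest : List Char), k ≤ ml.length →
      pvBVal wl (ml ++ rest) k = pvBVal wl ml k := by
  intro k
  induction k with
  | zero => intro _ _ _; rfl
  | succ k ih =>
    intro ml rest h
    have hk : k < ml.length := by omega
    have : (ml ++ rest).getD k 'a' = ml.getD k 'a' := by
      simp [List.getD, List.getElem?_append_left hk]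
    simp only [pvBVal, this]
    split_ifs
    · rfl
    · exact ih ml rest (by omega)

-- peel the LAST element off A's forward accumulation
theorem pvAVal_append (wl : List Char) :
    ∀ (ml : List Char) (aa : Char) (i : Nat) (p1 : Int),
      pvAVal wl (ml ++ [aa]) i p1 =
        if aa ≠ wl.getD (i + ml.length) 'a' then ((i + ml.length : Nat) : Int) + 1
        else pvAVal wl ml i p1 := by
  intro ml
  induction ml with
  | nil => intro aa i p1; simp [pvAVal]
  | cons b rest ih =>
    intro aa i p1
    simp only [List.cons_append, pvAVal, ih]
    have : i + (b :: rest).length = (i + 1) + rest.length := by simp; omega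
    rw [this]

-- the forward accumulation from 0 equals the backward scan value
theorem pvAVal_eq_pvBVal (wl : List Char) :
    ∀ (ml : List Char), pvAVal wl ml 0 (-1) = pvBVal wl ml ml.length := by
  intro ml
  induction ml using List.reverseRecOn with
  | nil => rfl
  | append_singleton ml aa ih =>
    rw [pvAVal_append]
    have hlen : (ml ++ [aa]).length = ml.length + 1 := by simp
    rw [hlen]
    have hget : (ml ++ [aa]).getD ml.length 'a' = aa := by
      simp [List.getD]
    simp only [pvBVal, hget, pvBVal_append wl ml.length ml [aa] le_rfl, ih, Nat.zero_add]
    by_cases h : aa = wl.getD ml.length 'a' <;> simp [h, ne_comm]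

theorem pvLoops_eq (wl ml : List Char) :
    pvALoop wl ml 0 (-1) = pvBLoop wl ml ml.length := by
  by_cases h : ml.length ≤ wl.length
  · rw [pvALoop_eq_toStr wl ml 0 (-1) (by omega),
        pvBLoop_eq_toStr wl ml ml.length h le_rfl, pvAVal_eq_pvBVal]
  · have hml : ml ≠ [] := by intro he; subst he; simp at h
    rw [pvALoop_na wl ml 0 (-1) hml (by omega)]
    obtain ⟨k, hk⟩ : ∃ k, ml.length = k + 1 := by
      cases ml with
      | nil => exact absurd rfl hml
      | cons a r => exact ⟨r.length, by simp⟩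
    have : PySem.List.pyGet? wl (k : Int) = none := by
      rw [PySem.List.pyGet?_natCast]
      simp; omega
    rw [hk]
    simp [pvBLoop, this]

-- ===== VERDICT (by name: the statement is the Claim_ definition above) =====
theorem position_of_mutation_epitope_spec : Claim_equal_position_of_mutation_epitope := by
  intro wild_type mutation _
  unfold Spec_position_of_mutation_epitope position_of_mutation_epitope position_of_mutation_epitope_alt
  exact pvLoops_eq _ _
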